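-- pv_equiv track=rewrite | github.com/yshenbj/rl | games/games/envs/gomoku.py | check
-- ===== SOURCE A (Python) =====
-- def check(ls, mark):
--     cnt = 0
--     for element in ls:
--         if element == mark:
--             cnt += 1
--         else:
--             cnt = 0
--     return cnt > 4
-- ===== SOURCE B (Python) =====
-- def check(ls, mark):
--     # A (cnt resets on mismatch, tested once after the loop) reports whether the
--     # TRAILING run of `mark` has length >= 5; so scan backwards from the end and
--     # stop at the first non-mark element.
--     n = 0
--     i = len(ls) - 1
--     while i >= 0 and ls[i] == mark:
--         n += 1
--         i -= 1
--     return n > 4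
-- ===== Notes on version B (the rewrite author's own statement) =====
-- stated objective: simpler
-- what changed: Instead of a full forward pass maintaining a counter that resets on mismatch, B scans backwards from the end and counts only the trailing run of mark, stopping (early exit) at the first mismatch.
import Mathlib
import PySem

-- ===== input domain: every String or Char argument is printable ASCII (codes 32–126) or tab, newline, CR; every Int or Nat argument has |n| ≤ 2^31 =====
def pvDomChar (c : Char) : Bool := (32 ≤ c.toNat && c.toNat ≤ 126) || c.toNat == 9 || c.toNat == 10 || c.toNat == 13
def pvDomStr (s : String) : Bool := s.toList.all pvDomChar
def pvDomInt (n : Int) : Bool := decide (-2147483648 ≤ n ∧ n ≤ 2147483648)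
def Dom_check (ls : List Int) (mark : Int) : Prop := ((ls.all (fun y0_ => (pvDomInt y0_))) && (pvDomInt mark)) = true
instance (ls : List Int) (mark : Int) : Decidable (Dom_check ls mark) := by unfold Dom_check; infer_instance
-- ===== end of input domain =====

-- B replaces A's full forward pass (counter resetting on mismatch) by a backward scan
-- counting only the trailing run of `mark` (objective: simpler; return value only).

-- ===== PORT A =====
-- for element in ls: cnt = cnt+1 if element == mark else 0; return cnt > 4
def check (ls : List Int) (mark : Int) : Bool :=
  let cnt := ls.foldl (fun cnt element => if element = mark then cnt + 1 else 0) (0 : Int)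
  decide (cnt > 4)

-- ===== PORT B =====
-- the backward while-loop of Source B: walk from the tail end while elements equal mark;
-- ported as recursion over the reversed list (index i walking down = prefix of reverse).
def checkAltRun (rev : List Int) (mark : Int) : Nat :=
  match rev with
  | [] => 0
  | x :: xs => if x = mark then checkAltRun xs mark + 1 else 0

def check_alt (ls : List Int) (mark : Int) : Bool :=
  decide (checkAltRun ls.reverse mark > 4)

-- ===== PRECONDITION & SPEC =====
def Spec_check (ls : List Int) (mark : Int) (out : Bool) : Prop := out = check_alt ls mark
instance (ls : List Int) (mark : Int) (out : Bool) : Decidable (Spec_check ls mark out) := by unfold Spec_check; infer_instance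

-- ===== CLAIM (what is proved, stated in full; the proofs are below) =====
def Claim_equal_check : Prop := ∀ (ls : List Int) (mark : Int), Dom_check ls mark → Spec_check ls mark (check ls mark)

-- ===== LEMMAS AND PROOFS =====
theorem check_fold_eq_run (ls : List Int) (mark : Int) :
    ls.foldl (fun cnt element => if element = mark then cnt + 1 else 0) (0 : Int)
      = (checkAltRun ls.reverse mark : Int) := by
  induction ls using List.reverseRecOn with
  | nil => simp [checkAltRun]
  | append_singleton xs x ih =>
    simp only [List.foldl_append, List.foldl_cons, List.foldl_nil, List.reverse_append,
      List.reverse_singleton, List.singleton_append, checkAltRun]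
    split_ifs with h
    · rw [ih]; push_cast; ring
    · simp

-- ===== VERDICT (by name: the statement is the Claim_ definition above) =====
theorem check_spec : Claim_equal_check := by
  intro ls mark _
  unfold Spec_check check check_alt
  rw [check_fold_eq_run]
  simp
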